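-- pv_equiv track=rewrite | github.com/RyanZzx99/EarthSeaEdu-toC | backend/services/ai_chat_pipeline_service.py | _summarize_subject_code_resolution_results
-- ===== SOURCE A (Python) =====
-- from typing import Any, Callable
--
-- def _summarize_subject_code_resolution_results(
--     resolution_results: dict[str, list[dict[str, Any]]],
-- ) -> dict[str, int]:
--     summary = {
--         "total_rows": 0,
--         "resolved_by_name": 0,
--         "corrected_by_name": 0,
--         "resolved_by_provided_code": 0,
--         "unresolved": 0,
--     }
--
--     for table_rows in resolution_results.values():
--         for item in table_rows:
--             status = item.get("resolution_status")
--             summary["total_rows"] += 1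
--             if status == "resolved_by_name":
--                 summary["resolved_by_name"] += 1
--             elif status == "corrected_by_name":
--                 summary["corrected_by_name"] += 1
--             elif status == "resolved_by_provided_code":
--                 summary["resolved_by_provided_code"] += 1
--             else:
--                 summary["unresolved"] += 1
--
--     return summary
-- ===== SOURCE B (Python) =====
-- from typing import Any
--
-- def _summarize_subject_code_resolution_results(
--     resolution_results: dict[str, list[dict[str, Any]]],
-- ) -> dict[str, int]:
--     statuses = [
--         item.get("resolution_status")
--         for table_rows in resolution_results.values()
--         for item in table_rows
--     ]
--     total = len(statuses)
--     resolved = statuses.count("resolved_by_name")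
--     corrected = statuses.count("corrected_by_name")
--     by_code = statuses.count("resolved_by_provided_code")
--     return {
--         "total_rows": total,
--         "resolved_by_name": resolved,
--         "corrected_by_name": corrected,
--         "resolved_by_provided_code": by_code,
--         "unresolved": total - resolved - corrected - by_code,
--     }
-- ===== Notes on version B (the rewrite author's own statement) =====
-- stated objective: idiomatic
-- what changed: Flattens all rows into one list of status values, computes each named count with list.count, and derives unresolved as the remainder, replacing the per-row if/elif tally with accumulator dict.
import Mathlib
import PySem

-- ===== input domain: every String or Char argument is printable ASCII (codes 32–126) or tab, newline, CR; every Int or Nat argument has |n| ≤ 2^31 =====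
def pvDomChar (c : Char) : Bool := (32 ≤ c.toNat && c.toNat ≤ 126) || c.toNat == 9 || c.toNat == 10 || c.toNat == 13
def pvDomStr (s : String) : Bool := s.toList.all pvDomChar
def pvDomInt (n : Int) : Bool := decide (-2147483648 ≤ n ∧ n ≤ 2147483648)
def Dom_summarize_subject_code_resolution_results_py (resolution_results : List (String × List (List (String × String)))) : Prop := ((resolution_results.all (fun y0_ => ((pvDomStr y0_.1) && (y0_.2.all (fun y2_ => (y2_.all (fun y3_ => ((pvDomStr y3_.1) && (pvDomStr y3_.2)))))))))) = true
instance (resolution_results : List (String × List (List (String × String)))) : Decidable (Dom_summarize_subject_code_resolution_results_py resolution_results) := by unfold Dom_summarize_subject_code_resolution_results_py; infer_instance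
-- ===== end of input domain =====

-- B replaces A's per-row if/elif tally with flatten-then-count-per-category
-- (unresolved = remainder); same O(n) cost, different decomposition.

-- ===== PORT A =====
-- item.get("resolution_status"): first-match lookup in the association list (dict convention)
def pvStatusOf (item : List (String × String)) : Option String :=
  List.lookup "resolution_status" item

-- one inner-loop iteration of A: state = (total, resolved, corrected, by_code, unresolved)
def pvStepA (s : Int × Int × Int × Int × Int) (item : List (String × String)) :
    Int × Int × Int × Int × Int :=
  let status := pvStatusOf item
  if status = some "resolved_by_name" then (s.1 + 1, s.2.1 + 1, s.2.2.1, s.2.2.2.1, s.2.2.2.2)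
  else if status = some "corrected_by_name" then (s.1 + 1, s.2.1, s.2.2.1 + 1, s.2.2.2.1, s.2.2.2.2)
  else if status = some "resolved_by_provided_code" then (s.1 + 1, s.2.1, s.2.2.1, s.2.2.2.1 + 1, s.2.2.2.2)
  else (s.1 + 1, s.2.1, s.2.2.1, s.2.2.2.1, s.2.2.2.2 + 1)

def summarize_subject_code_resolution_results_py (resolution_results : List (String × List (List (String × String)))) : List (String × Int) :=
  let s := resolution_results.foldl (fun s kv => kv.2.foldl pvStepA s) (0, 0, 0, 0, 0)
  [("total_rows", s.1), ("resolved_by_name", s.2.1), ("corrected_by_name", s.2.2.1),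
   ("resolved_by_provided_code", s.2.2.2.1), ("unresolved", s.2.2.2.2)]

-- ===== PORT B =====
def summarize_subject_code_resolution_results_py_alt (resolution_results : List (String × List (List (String × String)))) : List (String × Int) :=
  let statuses := resolution_results.flatMap (fun kv => kv.2.map pvStatusOf)
  let total : Int := statuses.length
  let resolved : Int := statuses.count (some "resolved_by_name")
  let corrected : Int := statuses.count (some "corrected_by_name")
  let by_code : Int := statuses.count (some "resolved_by_provided_code")
  [("total_rows", total), ("resolved_by_name", resolved), ("corrected_by_name", corrected),
   ("resolved_by_provided_code", by_code), ("unresolved", total - resolved - corrected - by_code)]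

-- ===== PRECONDITION & SPEC =====
def Spec_summarize_subject_code_resolution_results_py (resolution_results : List (String × List (List (String × String)))) (out : List (String × Int)) : Prop := out = summarize_subject_code_resolution_results_py_alt resolution_results
instance (resolution_results : List (String × List (List (String × String)))) (out : List (String × Int)) : Decidable (Spec_summarize_subject_code_resolution_results_py resolution_results out) := by unfold Spec_summarize_subject_code_resolution_results_py; infer_instance

-- ===== CLAIM =====
def Claim_equal_summarize_subject_code_resolution_results_py : Prop := ∀ (resolution_results : List (String × List (List (String × String)))), Dom_summarize_subject_code_resolution_results_py resolution_results → Spec_summarize_subject_code_resolution_results_py resolution_results (summarize_subject_code_resolution_results_py resolution_results)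

-- ===== LEMMAS AND PROOFS =====

-- A's step depends on the item only through its status
def pvStepS (s : Int × Int × Int × Int × Int) (status : Option String) :
    Int × Int × Int × Int × Int :=
  if status = some "resolved_by_name" then (s.1 + 1, s.2.1 + 1, s.2.2.1, s.2.2.2.1, s.2.2.2.2)
  else if status = some "corrected_by_name" then (s.1 + 1, s.2.1, s.2.2.1 + 1, s.2.2.2.1, s.2.2.2.2)
  else if status = some "resolved_by_provided_code" then (s.1 + 1, s.2.1, s.2.2.1, s.2.2.2.1 + 1, s.2.2.2.2)
  else (s.1 + 1, s.2.1, s.2.2.1, s.2.2.2.1, s.2.2.2.2 + 1)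

theorem pv_nested_foldl (rr : List (String × List (List (String × String))))
    (init : Int × Int × Int × Int × Int) :
    rr.foldl (fun s kv => kv.2.foldl pvStepA s) init
      = (rr.flatMap (fun kv => kv.2.map pvStatusOf)).foldl pvStepS init := by
  induction rr generalizing init with
  | nil => rfl
  | cons kv rest ih =>
    simp only [List.foldl_cons, List.flatMap_cons, List.foldl_append, List.foldl_map, ih]
    rfl

theorem pv_fold_counts (l : List (Option String)) (t r c p u : Int) :
    l.foldl pvStepS (t, r, c, p, u)
      = (t + l.length,
         r + l.count (some "resolved_by_name"),
         c + l.count (some "corrected_by_name"),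
         p + l.count (some "resolved_by_provided_code"),
         u + (l.length - l.count (some "resolved_by_name") - l.count (some "corrected_by_name")
              - l.count (some "resolved_by_provided_code"))) := by
  induction l generalizing t r c p u with
  | nil => simp
  | cons x xs ih =>
    simp only [List.foldl_cons, List.count_cons, List.length_cons, beq_iff_eq, pvStepS]
    by_cases h1 : x = some "resolved_by_name"
    · simp [h1, ih, Prod.ext_iff] <;> omega
    · by_cases h2 : x = some "corrected_by_name"
      · simp [h2, ih, Prod.ext_iff] <;> omega
      · by_cases h3 : x = some "resolved_by_provided_code"
        · simp [h3, ih, Prod.ext_iff] <;> omega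
        · simp [if_neg h1, if_neg h2, if_neg h3, ih, Prod.ext_iff] <;> omega

-- ===== VERDICT =====
theorem summarize_subject_code_resolution_results_py_spec : Claim_equal_summarize_subject_code_resolution_results_py := by
  intro rr _
  show _ = _
  simp only [summarize_subject_code_resolution_results_py,
    summarize_subject_code_resolution_results_py_alt, pv_nested_foldl, pv_fold_counts]
  norm_num
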